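-- pv_equiv track=rewrite | github.com/eugenekoh/Credit-Suisse-CodeIT-2020 | codeitsuisse/routes/intelligent_farming.py | get_dri_score
-- ===== SOURCE A (Python) =====
-- def get_dri_score(gene_seq):
--     score = 0
--     i = 0
--     while i < len(gene_seq):
--         if gene_seq[i:i + 3] == "AAA":
--             score -= 10
--             i += 3
--         elif gene_seq[i:i + 4] == "ACGT":
--             score += 15
--             i += 4
--         elif gene_seq[i:i + 2] == "CC":
--             score += 25
--             i += 2
--         else:
--             i += 1
--     return score
-- ===== SOURCE B (Python) =====
-- import re
--
-- _PATTERN = re.compile("AAA|ACGT|CC")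
-- _SCORES = {"AAA": -10, "ACGT": 15, "CC": 25}
--
-- def get_dri_score(gene_seq):
--     # re.finditer scans left-to-right with ordered alternation and resumes
--     # after each non-overlapping match, which is exactly A's greedy priority scan.
--     return sum(_SCORES[m.group()] for m in _PATTERN.finditer(gene_seq))
-- ===== Notes on version B (the rewrite author's own statement) =====
-- stated objective: idiomatic
-- what changed: Replaces the manual index/slice while-loop with a regex-driven scan: re.finditer over the three alternatives yields the non-overlapping matches in priority order and a dict lookup sums their scores.
import Mathlib
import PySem

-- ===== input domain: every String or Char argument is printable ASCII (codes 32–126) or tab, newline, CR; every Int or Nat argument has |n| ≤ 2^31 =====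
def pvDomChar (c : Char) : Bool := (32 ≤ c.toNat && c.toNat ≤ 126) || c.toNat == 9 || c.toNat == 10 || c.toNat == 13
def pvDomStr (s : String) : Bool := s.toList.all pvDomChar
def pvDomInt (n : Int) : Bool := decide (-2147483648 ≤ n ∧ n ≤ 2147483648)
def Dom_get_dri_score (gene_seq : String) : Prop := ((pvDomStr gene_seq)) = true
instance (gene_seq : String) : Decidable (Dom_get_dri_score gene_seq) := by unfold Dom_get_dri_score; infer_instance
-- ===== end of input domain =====

-- B replaces A's manual index/slice loop with a regex-style two-phase scan
-- (collect the non-overlapping matches of AAA|ACGT|CC, then sum their scores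
-- from a table); objective: idiomatic. Equal return value proved on all inputs.

-- ===== PORT A =====
-- A's while loop over index i, recursing on the suffix gene_seq[i:];
-- gene_seq[i:i+k] == "…" is the take of the suffix ('i += k' = dropping k chars).
def getDriLoopA (cs : List Char) (score : Int) : Int :=
  match cs with
  | [] => score
  | c :: rest =>
    if (c :: rest).take 3 = ['A','A','A'] then
      getDriLoopA (rest.drop 2) (score - 10)
    else if (c :: rest).take 4 = ['A','C','G','T'] then
      getDriLoopA (rest.drop 3) (score + 15)
    else if (c :: rest).take 2 = ['C','C'] then
      getDriLoopA (rest.drop 1) (score + 25)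
    else
      getDriLoopA rest score
  termination_by cs.length
  decreasing_by all_goals simp [List.length_drop]

def get_dri_score (gene_seq : String) : Int := getDriLoopA gene_seq.toList 0

-- ===== PORT B =====
-- Hand port of re.finditer("AAA|ACGT|CC", s): at each position try the
-- alternatives in pattern order (exact here because Python's alternation is
-- ordered, not longest-match), emit the match and resume after it, else
-- advance one char. Exact for this fixed pattern.
def pvFindMatches : List Char → List (List Char)
  | 'A' :: 'A' :: 'A' :: rest => ['A','A','A'] :: pvFindMatches rest
  | 'A' :: 'C' :: 'G' :: 'T' :: rest => ['A','C','G','T'] :: pvFindMatches rest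
  | 'C' :: 'C' :: rest => ['C','C'] :: pvFindMatches rest
  | _ :: rest => pvFindMatches rest
  | [] => []

-- the dict _SCORES = {'AAA': -10, 'ACGT': 15, 'CC': 25}
def pvScores : PySem.Dict (List Char) Int :=
  PySem.Dict.ofList [(['A','A','A'], -10), (['A','C','G','T'], 15), (['C','C'], 25)]

def get_dri_score_alt (gene_seq : String) : Int :=
  (pvFindMatches gene_seq.toList).foldl
    (fun acc m => acc + PySem.Dict.getD pvScores m 0) 0

-- ===== PRECONDITION & SPEC =====
def Spec_get_dri_score (gene_seq : String) (out : Int) : Prop := out = get_dri_score_alt gene_seq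
instance (gene_seq : String) (out : Int) : Decidable (Spec_get_dri_score gene_seq out) := by unfold Spec_get_dri_score; infer_instance

-- ===== CLAIM (what is proved, stated in full; the proofs are below) =====
def Claim_equal_get_dri_score : Prop := ∀ (gene_seq : String), Dom_get_dri_score gene_seq → Spec_get_dri_score gene_seq (get_dri_score gene_seq)

-- ===== LEMMAS AND PROOFS =====

def pvSum (ms : List (List Char)) : Int :=
  ms.foldl (fun acc m => acc + PySem.Dict.getD pvScores m 0) 0

theorem pvSum_cons (m : List Char) (ms : List (List Char)) :
    pvSum (m :: ms) = PySem.Dict.getD pvScores m 0 + pvSum ms := by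
  simp [pvSum, PySem.List.foldl_add]

theorem pvScore_AAA : PySem.Dict.getD pvScores ['A','A','A'] 0 = -10 := by decide
theorem pvScore_ACGT : PySem.Dict.getD pvScores ['A','C','G','T'] 0 = 15 := by decide
theorem pvScore_CC : PySem.Dict.getD pvScores ['C','C'] 0 = 25 := by decide

theorem pvFindMatches_cons (c : Char) (rest : List Char)
    (h1 : (c :: rest).take 3 ≠ (['A','A','A'] : List Char))
    (h2 : (c :: rest).take 4 ≠ (['A','C','G','T'] : List Char))
    (h3 : (c :: rest).take 2 ≠ (['C','C'] : List Char)) :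
    pvFindMatches (c :: rest) = pvFindMatches rest := by
  rw [pvFindMatches.eq_def]
  split <;> simp_all

theorem getDriLoopA_eq (cs : List Char) (score : Int) :
    getDriLoopA cs score = score + pvSum (pvFindMatches cs) := by
  fun_induction getDriLoopA cs score with
  | case1 score => simp [pvFindMatches, pvSum]
  | case2 score c rest h ih =>
    rcases rest with _ | ⟨d, rest⟩; · simp at h
    rcases rest with _ | ⟨e, rest⟩; · simp at h
    obtain ⟨rfl, rfl, rfl⟩ : c = 'A' ∧ d = 'A' ∧ e = 'A' := by simpa using h
    simp only [List.drop_succ_cons, List.drop_zero] at ih ⊢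
    rw [ih, show pvFindMatches ('A'::'A'::'A'::rest) = ['A','A','A'] :: pvFindMatches rest from rfl,
       pvSum_cons, pvScore_AAA]
    omega
  | case3 score c rest h1 h ih =>
    rcases rest with _ | ⟨d, rest⟩; · simp at h
    rcases rest with _ | ⟨e, rest⟩; · simp at h
    rcases rest with _ | ⟨f, rest⟩; · simp at h
    obtain ⟨rfl, rfl, rfl, rfl⟩ : c = 'A' ∧ d = 'C' ∧ e = 'G' ∧ f = 'T' := by simpa using h
    simp only [List.drop_succ_cons, List.drop_zero] at ih ⊢
    rw [ih, show pvFindMatches ('A'::'C'::'G'::'T'::rest) = ['A','C','G','T'] :: pvFindMatches rest from rfl,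
       pvSum_cons, pvScore_ACGT]
    omega
  | case4 score c rest h1 h2 h ih =>
    rcases rest with _ | ⟨d, rest⟩; · simp at h
    obtain ⟨rfl, rfl⟩ : c = 'C' ∧ d = 'C' := by simpa using h
    simp only [List.drop_succ_cons, List.drop_zero] at ih ⊢
    rw [ih, show pvFindMatches ('C'::'C'::rest) = ['C','C'] :: pvFindMatches rest from rfl,
       pvSum_cons, pvScore_CC]
    omega
  | case5 score c rest h1 h2 h3 ih =>
    rw [ih, pvFindMatches_cons c rest h1 h2 h3]

theorem get_dri_score_spec : Claim_equal_get_dri_score := by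
  intro s _
  unfold Spec_get_dri_score get_dri_score get_dri_score_alt
  rw [getDriLoopA_eq]
  simp [pvSum]
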